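-- pv_equiv track=rewrite | github.com/BehroozMontazeran/pyTOjs | data_pool/Simple_codes/simple/34.py | countPermutation
-- ===== SOURCE A (Python) =====
-- def compute_z(s, z):
--     l = 0
--     r = 0
--     n = len(s)
--     for i in range(1,  n,  1):
--         if (i > r):
--             l = i
--             r = i
--             while (r < n and s[r - l] == s[r]):
--                 r += 1
--             z[i] = r - l
--             r -= 1
--         else:
--             k = i - l
--             if (z[k] < r - i + 1):
--                 z[i] = z[k]
--             else:
--                 l = i
--                 while (r < n and s[r - l] == s[r]):
--                     r += 1
--                 z[i] = r - l
--                 r -= 1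
--
-- def countPermutation(a, b):
--     b = b + b
--     b = b[0:  len(b) - 1]
--     ans = 0
--     s = a + "  $  " + b
--     n = len(s)
--     z = [0 for i in range(n)]
--     compute_z(s,  z)
--     for i in range(1,  n,  1):
--         if (z[i] == len(a)):
--             ans += 1
--     return ans
-- ===== SOURCE B (Python) =====
-- def countPermutation(a, b):
--     bb = b + b
--     bb = bb[0:len(bb) - 1]
--     s = a + "  $  " + bb
--     n = len(s)
--     la = len(a)
--     ans = 0
--     for i in range(1, n):
--         if s[i:i + la] == a and (i + la == n or s[i + la] != s[la]):
--             ans += 1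
--     return ans
-- ===== Notes on version B (the rewrite author's own statement) =====
-- stated objective: simpler
-- what changed: A builds the combined string a+' $ '+(b+b)[:-1], runs the linear-time Z-algorithm over it and counts Z-values equal to len(a); B builds the same string but counts positions directly with a naive maximal-match scan (s[i:i+len(a)] == a and the next character differs from s[len(a)]), with no Z-array or l/r window bookkeeping.
import Mathlib
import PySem

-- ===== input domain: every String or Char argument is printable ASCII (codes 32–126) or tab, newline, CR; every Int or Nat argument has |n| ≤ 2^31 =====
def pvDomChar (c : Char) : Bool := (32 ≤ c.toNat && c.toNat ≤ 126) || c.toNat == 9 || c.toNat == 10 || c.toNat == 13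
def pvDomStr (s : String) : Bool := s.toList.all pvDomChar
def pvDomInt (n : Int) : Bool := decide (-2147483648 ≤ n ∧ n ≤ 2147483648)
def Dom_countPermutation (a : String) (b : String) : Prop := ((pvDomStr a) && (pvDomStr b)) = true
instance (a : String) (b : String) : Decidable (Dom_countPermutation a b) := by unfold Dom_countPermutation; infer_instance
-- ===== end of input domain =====

-- B replaces A's linear-time Z-algorithm by a short direct scan of the same combined
-- string that rechecks each candidate position naively (objective: simpler — much
-- shorter, no Z-array machinery).

-- ===== PORT A =====
-- the two inner `while (r < n and s[r - l] == s[r]): r += 1` loops of compute_z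
def zExtend (s : List Char) (n l : Nat) (r : Nat) : Nat :=
  if h : r < n ∧ s.getD (r - l) ' ' = s.getD r ' ' then zExtend s n l (r + 1) else r
termination_by n - r
decreasing_by omega

-- one iteration of compute_z's `for i in range(1, n, 1)` loop; state = (l, r, z)
def zStep (s : List Char) (n : Nat) (st : Nat × Nat × List Nat) (i : Nat) : Nat × Nat × List Nat :=
  let l := st.1
  let r := st.2.1
  let z := st.2.2
  if i > r then
    let r' := zExtend s n i i
    (i, r' - 1, z.set i (r' - i))
  else
    let k := i - l
    if z.getD k 0 < r - i + 1 then
      (l, r, z.set i (z.getD k 0))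
    else
      let r' := zExtend s n i r
      (i, r' - 1, z.set i (r' - i))

def computeZ (s : List Char) (n : Nat) : List Nat :=
  ((List.range' 1 (n - 1)).foldl (zStep s n) (0, 0, List.replicate n 0)).2.2

def countPermutation (a : String) (b : String) : Int :=
  let b1 := b.toList ++ b.toList                 -- b = b + b
  let b2 := b1.take (b1.length - 1)              -- b = b[0 : len(b) - 1]
  let s := a.toList ++ "  $  ".toList ++ b2      -- s = a + "  $  " + b
  let n := s.length
  let z := computeZ s n
  (List.range' 1 (n - 1)).foldl
    (fun ans i => if z.getD i 0 = a.toList.length then ans + 1 else ans) (0 : Int)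

-- ===== PORT B =====
def countPermutation_alt (a : String) (b : String) : Int :=
  let b1 := b.toList ++ b.toList
  let b2 := b1.take (b1.length - 1)
  let s := a.toList ++ "  $  ".toList ++ b2
  let n := s.length
  let la := a.toList.length
  (List.range' 1 (n - 1)).foldl
    (fun ans i =>
      if (s.drop i).take la = a.toList ∧ (i + la = n ∨ s.getD (i + la) ' ' ≠ s.getD la ' ')
      then ans + 1 else ans) (0 : Int)

-- ===== PRECONDITION & SPEC =====
def Spec_countPermutation (a : String) (b : String) (out : Int) : Prop := out = countPermutation_alt a b
instance (a : String) (b : String) (out : Int) : Decidable (Spec_countPermutation a b out) := by unfold Spec_countPermutation; infer_instance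

-- ===== CLAIM (what is proved, stated in full; the proofs are below) =====
def Claim_equal_countPermutation : Prop := ∀ (a : String) (b : String), Dom_countPermutation a b → Spec_countPermutation a b (countPermutation a b)

-- ===== LEMMAS AND PROOFS =====

/-- length of the longest common prefix of two character lists -/
def pvLcp : List Char → List Char → Nat
  | [], _ => 0
  | _ :: _, [] => 0
  | x :: xs, y :: ys => if x = y then pvLcp xs ys + 1 else 0

theorem pvLcp_le_right (xs ys : List Char) : pvLcp xs ys ≤ ys.length := by
  induction xs generalizing ys with
  | nil => simp [pvLcp]
  | cons x xs ih =>
    cases ys with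
    | nil => simp [pvLcp]
    | cons y ys =>
      simp only [pvLcp, List.length_cons]
      split_ifs
      · exact Nat.succ_le_succ (ih ys)
      · omega

theorem pvLcp_lt_get (xs ys : List Char) (j : Nat) (h : j < pvLcp xs ys) :
    xs[j]? = ys[j]? ∧ (xs[j]?).isSome := by
  induction xs generalizing ys j with
  | nil => simp [pvLcp] at h
  | cons x xs ih =>
    cases ys with
    | nil => simp [pvLcp] at h
    | cons y ys =>
      simp only [pvLcp] at h
      split_ifs at h with hxy
      · cases j with
        | zero => simp [hxy]
        | succ j => simpa using ih ys j (by omega)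
      · omega

theorem pvLcp_mism (xs ys : List Char) :
    ¬ (xs[pvLcp xs ys]? = ys[pvLcp xs ys]? ∧ (xs[pvLcp xs ys]?).isSome) := by
  induction xs generalizing ys with
  | nil => simp [pvLcp]
  | cons x xs ih =>
    cases ys with
    | nil => simp [pvLcp]
    | cons y ys =>
      simp only [pvLcp]
      split_ifs with hxy
      · simpa using ih ys
      · simp only [List.getElem?_cons_zero, Option.isSome_some, and_true, Option.some.injEq]
        intro h; exact absurd h hxy

theorem pvLcp_unique (xs ys : List Char) (k : Nat)
    (h1 : ∀ j, j < k → xs[j]? = ys[j]? ∧ (xs[j]?).isSome)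
    (h2 : ¬ (xs[k]? = ys[k]? ∧ (xs[k]?).isSome)) :
    pvLcp xs ys = k := by
  induction xs generalizing ys k with
  | nil =>
    cases k with
    | zero => simp [pvLcp]
    | succ k => simpa using (h1 0 (by omega)).2
  | cons x xs ih =>
    cases ys with
    | nil =>
      cases k with
      | zero => simp [pvLcp]
      | succ k => simpa using (h1 0 (by omega)).1
    | cons y ys =>
      cases k with
      | zero =>
        simp only [List.getElem?_cons_zero, Option.isSome_some, and_true,
          Option.some.injEq] at h2
        simp [pvLcp, h2]
      | succ k =>
        have h0 := (h1 0 (by omega)).1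
        simp only [List.getElem?_cons_zero, Option.some.injEq] at h0
        simp only [pvLcp, h0, if_true]
        have := ih ys k (fun j hj => by simpa using h1 (j + 1) (by omega))
          (by simpa using h2)
        omega

theorem getD_eq_of_lt (s : List Char) (i : Nat) (h : i < s.length) (d : Char) :
    s.getD i d = s[i] := by
  simp [List.getD_eq_getElem?_getD, List.getElem?_eq_getElem h]

theorem zExtend_eq (s : List Char) (l r : Nat) (hl : l ≤ r) (hr : r ≤ s.length)
    (hm : ∀ j, l ≤ j → j < r → s[j - l]? = s[j]?) :
    zExtend s s.length l r = l + pvLcp s (s.drop l) := by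
  rw [zExtend]
  split
  · next h =>
    obtain ⟨hrn, hcd⟩ := h
    have hrl : r - l < s.length := by omega
    rw [getD_eq_of_lt s _ hrl ' ', getD_eq_of_lt s _ hrn ' '] at hcd
    have hget : s[r - l]? = s[r]? := by
      rw [List.getElem?_eq_getElem hrl, List.getElem?_eq_getElem hrn, hcd]
    exact zExtend_eq s l (r + 1) (by omega) (by omega) (fun j hj hjr => by
      rcases Nat.lt_or_ge j r with h' | h'
      · exact hm j hj h'
      · have hjr' : j = r := by omega
        subst hjr'; exact hget)
  · next h =>
    have hlcp : pvLcp s (s.drop l) = r - l := by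
      apply pvLcp_unique
      · intro j hj
        have hjn : j < s.length := by omega
        have h1 : s[(l + j) - l]? = s[l + j]? := hm (l + j) (by omega) (by omega)
        rw [Nat.add_sub_cancel_left] at h1
        refine ⟨by rw [List.getElem?_drop]; exact h1, ?_⟩
        simp [List.getElem?_eq_getElem hjn]
      · rw [List.getElem?_drop, show l + (r - l) = r from by omega]
        rintro ⟨heq, hsome⟩
        rcases Nat.lt_or_ge r s.length with hrn | hrn
        · apply h
          refine ⟨hrn, ?_⟩
          have hrl : r - l < s.length := by omega
          rw [List.getElem?_eq_getElem hrl, List.getElem?_eq_getElem hrn] at heq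
          rw [getD_eq_of_lt s _ hrl ' ', getD_eq_of_lt s _ hrn ' ']
          exact Option.some.inj heq
        · have hnone : s[r]? = none := List.getElem?_eq_none (by omega)
          rw [heq, hnone] at hsome
          simp at hsome
    omega
termination_by s.length - r
decreasing_by omega

/-- loop invariant of compute_z: about to process index `i` with state `(l, r, z)` -/
def ZInv (s : List Char) (i : Nat) (st : Nat × Nat × List Nat) : Prop :=
  st.2.2.length = s.length ∧ st.1 < i ∧ st.1 ≤ st.2.1 + 1 ∧ st.2.1 + 1 ≤ s.length ∧
  (st.1 = 0 → st.2.1 = 0) ∧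
  (∀ j, st.1 ≤ j → j ≤ st.2.1 → s[j - st.1]? = s[j]?) ∧
  (∀ j, 1 ≤ j → j < i → st.2.2.getD j 0 = pvLcp s (s.drop j))

theorem ZInv_extend (s : List Char) (i : Nat) (hi1 : 1 ≤ i) (hin : i < s.length)
    (z : List Nat) (hzlen : z.length = s.length)
    (hz : ∀ j, 1 ≤ j → j < i → z.getD j 0 = pvLcp s (s.drop j)) :
    ZInv s (i + 1) (i, i + pvLcp s (s.drop i) - 1, z.set i (pvLcp s (s.drop i))) := by
  have hZle : pvLcp s (s.drop i) ≤ s.length - i := by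
    have := pvLcp_le_right s (s.drop i); simpa [List.length_drop] using this
  unfold ZInv
  dsimp only
  refine ⟨by simp [hzlen], by omega, by omega, by omega, by omega, ?_, ?_⟩
  · intro j hij hjr
    have hji : j - i < pvLcp s (s.drop i) := by omega
    have h1 := (pvLcp_lt_get s (s.drop i) (j - i) hji).1
    rw [List.getElem?_drop, show i + (j - i) = j from by omega] at h1
    exact h1
  · intro j hj1 hji
    rcases Nat.lt_or_ge j i with hlt | hge
    · rw [List.getD_eq_getElem?_getD, List.getElem?_set_ne (by omega),
        ← List.getD_eq_getElem?_getD]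
      exact hz j hj1 hlt
    · have hj : j = i := by omega
      subst hj
      rw [List.getD_eq_getElem?_getD, List.getElem?_set_self (by omega)]
      rfl

theorem Z_copy (s : List Char) (l r i : Nat) (_hl1 : 1 ≤ l) (hli : l < i) (hir : i ≤ r)
    (_hrn : r < s.length)
    (hbox : ∀ j, l ≤ j → j ≤ r → s[j - l]? = s[j]?)
    (hZk : pvLcp s (s.drop (i - l)) < r - i + 1) :
    pvLcp s (s.drop i) = pvLcp s (s.drop (i - l)) := by
  apply pvLcp_unique
  · intro j hj
    have h1 := pvLcp_lt_get s (s.drop (i - l)) j hj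
    rw [List.getElem?_drop] at h1
    have hb := hbox (i + j) (by omega) (by omega)
    rw [show i + j - l = (i - l) + j from by omega] at hb
    rw [List.getElem?_drop]
    exact ⟨h1.1.trans hb, h1.2⟩
  · set Zk := pvLcp s (s.drop (i - l)) with hZkdef
    have hm := pvLcp_mism s (s.drop (i - l))
    rw [List.getElem?_drop] at hm
    have hb := hbox (i + Zk) (by omega) (by omega)
    rw [show i + Zk - l = (i - l) + Zk from by omega] at hb
    rw [List.getElem?_drop, ← hb]
    exact hm

theorem zStep_inv (s : List Char) (i : Nat) (st : Nat × Nat × List Nat)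
    (h : ZInv s i st) (hi1 : 1 ≤ i) (hin : i < s.length) :
    ZInv s (i + 1) (zStep s s.length st i) := by
  obtain ⟨l, r, z⟩ := st
  unfold ZInv at h
  dsimp only at h
  obtain ⟨hzlen, hli, hlr, hrn, hl0, hbox, hz⟩ := h
  unfold zStep
  dsimp only
  split
  · -- i > r : fresh extension from r = i with l = i
    next hgt =>
    rw [zExtend_eq s i i (le_refl i) (by omega) (fun j h1 h2 => absurd h2 (by omega))]
    rw [show i + pvLcp s (s.drop i) - i = pvLcp s (s.drop i) from by omega]
    exact ZInv_extend s i hi1 hin z hzlen hz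
  · next hle =>
    have hir : i ≤ r := by omega
    have hl1 : 1 ≤ l := by
      by_contra hc
      have : l = 0 := by omega
      have := hl0 this
      omega
    have hk1 : 1 ≤ i - l := by omega
    have hki : i - l < i := by omega
    have hzk : z.getD (i - l) 0 = pvLcp s (s.drop (i - l)) := hz (i - l) hk1 hki
    split
    · -- z[k] < r - i + 1 : copy
      next hlt =>
      rw [hzk] at hlt ⊢
      have hcopy := Z_copy s l r i hl1 (by omega) hir (by omega) hbox hlt
      unfold ZInv
      dsimp only
      refine ⟨by simp [hzlen], by omega, by omega, by omega, hl0, hbox, ?_⟩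
      intro j hj1 hji
      rcases Nat.lt_or_ge j i with hjlt | hjge
      · rw [List.getD_eq_getElem?_getD, List.getElem?_set_ne (by omega),
          ← List.getD_eq_getElem?_getD]
        exact hz j hj1 hjlt
      · have hj : j = i := by omega
        subst hj
        rw [List.getD_eq_getElem?_getD, List.getElem?_set_self (by omega), hcopy]
        rfl
    · -- z[k] ≥ r - i + 1 : extend from current r with l = i
      next hge =>
      rw [hzk] at hge
      have hZk : r - i + 1 ≤ pvLcp s (s.drop (i - l)) := by omega
      have hmatch : ∀ j, i ≤ j → j < r → s[j - i]? = s[j]? := by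
        intro j hij hjr
        have hmlt : j - i < pvLcp s (s.drop (i - l)) := by omega
        have h1 := (pvLcp_lt_get s (s.drop (i - l)) (j - i) hmlt).1
        rw [List.getElem?_drop] at h1
        have hb := hbox j (by omega) (by omega)
        rw [show j - l = (i - l) + (j - i) from by omega] at hb
        exact h1.trans hb
      rw [zExtend_eq s i r hir (by omega) hmatch]
      rw [show i + pvLcp s (s.drop i) - i = pvLcp s (s.drop i) from by omega]
      exact ZInv_extend s i hi1 hin z hzlen hz

theorem foldl_inv {σ : Type} (f : σ → Nat → σ) (P : Nat → σ → Prop)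
    (start len : Nat) (st : σ) (h0 : P start st)
    (hstep : ∀ i st', start ≤ i → i < start + len → P i st' → P (i + 1) (f st' i)) :
    P (start + len) (List.foldl f st (List.range' start len)) := by
  induction len generalizing start st with
  | zero => simpa using h0
  | succ m ih =>
    rw [List.range'_succ, List.foldl_cons]
    have h1 : P (start + 1) (f st start) := hstep start st (le_refl _) (by omega) h0
    have := ih (start + 1) (f st start) h1
      (fun i st' hi hi' hp => hstep i st' (by omega) (by omega) hp)
    rwa [show start + (m + 1) = start + 1 + m from by omega]

theorem computeZ_correct (s : List Char) (hn : 1 ≤ s.length) (j : Nat)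
    (hj1 : 1 ≤ j) (hj : j < s.length) :
    (computeZ s s.length).getD j 0 = pvLcp s (s.drop j) := by
  have h0 : ZInv s 1 (0, 0, List.replicate s.length 0) := by
    unfold ZInv
    dsimp only
    refine ⟨by simp, by omega, by omega, by omega, fun _ => rfl, ?_, ?_⟩
    · intro j h1 h2
      have : j = 0 := by omega
      subst this; rfl
    · intro j h1 h2; omega
  have h := foldl_inv (zStep s s.length) (ZInv s) 1 (s.length - 1)
    (0, 0, List.replicate s.length 0) h0
    (fun i st' hi hi' hp => zStep_inv s i st' hp hi (by omega))
  rw [show 1 + (s.length - 1) = s.length from by omega] at h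
  unfold ZInv at h
  exact h.2.2.2.2.2.2 j hj1 hj

theorem take_eq_of_get (xs ys : List Char) (k : Nat)
    (h : ∀ j, j < k → xs[j]? = ys[j]?) : xs.take k = ys.take k := by
  apply List.ext_getElem?
  intro j
  rw [List.getElem?_take, List.getElem?_take]
  split
  · exact h j (by assumption)
  · rfl

theorem cond_iff (aL s : List Char) (hpre : s.take aL.length = aL)
    (hla : aL.length < s.length) (i : Nat) (_hi1 : 1 ≤ i) (hin : i < s.length) :
    pvLcp s (s.drop i) = aL.length ↔
    ((s.drop i).take aL.length = aL ∧
      (i + aL.length = s.length ∨ s.getD (i + aL.length) ' ' ≠ s.getD aL.length ' ')) := by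
  have hpre' : ∀ j, j < aL.length → s[j]? = aL[j]? := by
    intro j hj
    rw [← hpre, List.getElem?_take]
    simp [hj]
  constructor
  · intro h
    have hle : aL.length ≤ s.length - i := by
      have := pvLcp_le_right s (s.drop i)
      rw [h, List.length_drop] at this; exact this
    have hmatch : ∀ j, j < aL.length → s[j]? = s[i + j]? := by
      intro j hj
      have := (pvLcp_lt_get s (s.drop i) j (by omega)).1
      rwa [List.getElem?_drop] at this
    constructor
    · have ht : (s.drop i).take aL.length = s.take aL.length := by
        apply take_eq_of_get
        intro j hj
        rw [List.getElem?_drop]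
        exact (hmatch j hj).symm
      rw [ht, hpre]
    · have hm := pvLcp_mism s (s.drop i)
      rw [h, List.getElem?_drop] at hm
      rcases Nat.lt_or_ge (i + aL.length) s.length with hlt | hge
      · right
        intro hcd
        apply hm
        rw [getD_eq_of_lt s _ hlt ' ', getD_eq_of_lt s _ hla ' '] at hcd
        rw [List.getElem?_eq_getElem hla, List.getElem?_eq_getElem hlt, hcd]
        simp
      · left; omega
  · rintro ⟨htake, hg⟩
    have hlen : aL.length ≤ s.length - i := by
      have := congrArg List.length htake
      simp only [List.length_take, List.length_drop] at this
      omega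
    have htake' : ∀ j, j < aL.length → s[i + j]? = aL[j]? := by
      intro j hj
      rw [← htake, List.getElem?_take]
      simp [hj, List.getElem?_drop]
    apply pvLcp_unique
    · intro j hj
      refine ⟨?_, by simp [List.getElem?_eq_getElem (show j < s.length from by omega)]⟩
      rw [List.getElem?_drop, htake' j hj]
      exact hpre' j hj
    · rw [List.getElem?_drop]
      rintro ⟨heq, hsome⟩
      rcases Nat.lt_or_ge (i + aL.length) s.length with hlt | hge
      · rcases hg with hg | hg
        · omega
        · apply hg
          rw [getD_eq_of_lt s _ hlt ' ', getD_eq_of_lt s _ hla ' ']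
          rw [List.getElem?_eq_getElem hla, List.getElem?_eq_getElem hlt] at heq
          exact (Option.some.inj heq).symm
      · have hnone : s[i + aL.length]? = none := List.getElem?_eq_none (by omega)
        rw [heq, hnone] at hsome
        simp at hsome

theorem foldl_count_congr (L : List Nat) (p q : Nat → Prop) [DecidablePred p]
    [DecidablePred q] (h : ∀ i ∈ L, p i ↔ q i) (c : Int) :
    L.foldl (fun ans i => if p i then ans + 1 else ans) c =
    L.foldl (fun ans i => if q i then ans + 1 else ans) c := by
  induction L generalizing c with
  | nil => rfl
  | cons x xs ih =>
    simp only [List.foldl_cons]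
    rw [if_congr (h x (by simp)) rfl rfl]
    exact ih (fun i hi => h i (by simp [hi])) _

-- ===== VERDICT (by name: the statement is the Claim_ definition above) =====
theorem countPermutation_spec : Claim_equal_countPermutation := by
  intro a b _
  unfold Spec_countPermutation countPermutation countPermutation_alt
  dsimp only
  set aL := a.toList with haL
  set b2 := ((b.toList ++ b.toList).take ((b.toList ++ b.toList).length - 1)) with hb2
  set s := aL ++ "  $  ".toList ++ b2 with hs
  have hsep : ("  $  ".toList : List Char).length = 5 := by decide
  have hslen : s.length = aL.length + 5 + b2.length := by
    simp [hs, List.length_append]; omega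
  have hla : aL.length < s.length := by omega
  have hpre : s.take aL.length = aL := by
    rw [hs, List.append_assoc, List.take_left]
  apply foldl_count_congr
  intro i hi
  rw [List.mem_range'_1] at hi
  have hi1 : 1 ≤ i := hi.1
  have hin : i < s.length := by omega
  rw [computeZ_correct s (by omega) i hi1 hin]
  exact cond_iff aL s hpre hla i hi1 hin
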